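-- pv_equiv track=rewrite | github.com/vincenzorm117/CCI_6edition | problems/chapter16/9_operations/python/solution.py | negate_slow
-- ===== SOURCE A (Python) =====
-- def negate_slow(x):
--     if x == 0:
--         return x
--     elif x < 0:
--         count = 0
--         while x < 0:
--             x += 1
--             count += 1
--         while 0 < count:
--             x += 1
--             count += -1
--     else:
--         count = 0
--         while 0 < x:
--             x += -1
--             count += 1
--         while 0 < count:
--             x += -1
--             count += -1
--     return x
-- ===== SOURCE B (Python) =====
-- def negate_slow(x):
--     if x == 0:
--         return x
--     a = x
--     neg = 0
--     delta = 1 if x < 0 else -1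
--     while a != 0:
--         if abs(delta) > abs(a):
--             delta = 1 if a < 0 else -1
--         a += delta
--         neg += delta
--         delta += delta
--     return neg
-- ===== Notes on version B (the rewrite author's own statement) =====
-- stated objective: faster
-- what changed: Replaces the two unit-step counting loops (O(|x|) increments) with a single doubling-delta loop that adds an exponentially growing step to both a running copy of x and the accumulator, resetting the step to a unit whenever it would overshoot zero, giving O(log|x|) iterations.
import Mathlib
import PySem

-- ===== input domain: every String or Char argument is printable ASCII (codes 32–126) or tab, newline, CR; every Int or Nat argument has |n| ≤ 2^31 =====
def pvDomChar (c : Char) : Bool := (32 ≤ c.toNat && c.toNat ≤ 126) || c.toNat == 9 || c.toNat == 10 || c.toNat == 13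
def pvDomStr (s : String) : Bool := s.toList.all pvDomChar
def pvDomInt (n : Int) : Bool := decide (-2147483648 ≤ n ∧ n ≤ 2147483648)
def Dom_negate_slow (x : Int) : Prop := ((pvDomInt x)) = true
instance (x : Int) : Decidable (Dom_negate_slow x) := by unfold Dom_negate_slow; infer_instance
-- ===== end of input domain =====

-- B replaces A's unit-step counting loops with a single doubling-delta loop (fewer iterations).
-- Each Python `while` is ported as structural recursion on a fuel that provably exceeds the
-- number of iterations the loop performs (proved in the lemmas below), so fuel exhaustion
-- is never reached and each port computes exactly what its Python computes.

-- ===== PORT A =====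
-- while x < 0: x += 1; count += 1     (runs exactly |x| times; fuel = x.natAbs)
def negLoopA1 : Nat → Int → Int → Int × Int
  | 0, x, count => (x, count)
  | fuel + 1, x, count => if x < 0 then negLoopA1 fuel (x + 1) (count + 1) else (x, count)

-- while 0 < count: x += 1; count += -1     (runs exactly max count 0 times; fuel = count.natAbs)
def negLoopA2 : Nat → Int → Int → Int
  | 0, x, _ => x
  | fuel + 1, x, count => if 0 < count then negLoopA2 fuel (x + 1) (count + -1) else x

-- while 0 < x: x += -1; count += 1
def negLoopA3 : Nat → Int → Int → Int × Int
  | 0, x, count => (x, count)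
  | fuel + 1, x, count => if 0 < x then negLoopA3 fuel (x + -1) (count + 1) else (x, count)

-- while 0 < count: x += -1; count += -1
def negLoopA4 : Nat → Int → Int → Int
  | 0, x, _ => x
  | fuel + 1, x, count => if 0 < count then negLoopA4 fuel (x + -1) (count + -1) else x

def negate_slow (x : Int) : Int :=
  if x = 0 then x
  else if x < 0 then
    let p := negLoopA1 x.natAbs x 0
    negLoopA2 p.2.natAbs p.1 p.2
  else
    let p := negLoopA3 x.natAbs x 0
    negLoopA4 p.2.natAbs p.1 p.2

-- ===== PORT B =====
-- while a != 0: if abs(delta) > abs(a): delta = 1 if a < 0 else -1; a += delta; neg += delta; delta += delta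
-- (every iteration brings a strictly closer to 0, so fuel = a.natAbs suffices; proved below)
def negLoopB : Nat → Int → Int → Int → Int
  | 0, _, neg, _ => neg
  | fuel + 1, a, neg, delta =>
    if a = 0 then neg
    else
      let d := if delta.natAbs > a.natAbs then (if a < 0 then 1 else -1) else delta
      negLoopB fuel (a + d) (neg + d) (d + d)

def negate_slow_alt (x : Int) : Int :=
  if x = 0 then x
  else negLoopB x.natAbs x 0 (if x < 0 then 1 else -1)

-- ===== PRECONDITION & SPEC =====
def Spec_negate_slow (x : Int) (out : Int) : Prop := out = negate_slow_alt x
instance (x : Int) (out : Int) : Decidable (Spec_negate_slow x out) := by unfold Spec_negate_slow; infer_instance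

-- ===== CLAIM (what is proved, stated in full; the proofs are below) =====
def Claim_equal_negate_slow : Prop := ∀ (x : Int), Dom_negate_slow x → Spec_negate_slow x (negate_slow x)

-- ===== LEMMAS AND PROOFS =====
theorem negLoopA1_eq (fuel : Nat) : ∀ (x count : Int), x.natAbs ≤ fuel →
    negLoopA1 fuel x count = if x < 0 then (0, count - x) else (x, count) := by
  induction fuel with
  | zero =>
    intro x count h
    simp only [negLoopA1]
    split <;> [omega; rfl]
  | succ n ih =>
    intro x count h
    simp only [negLoopA1]
    split
    · rename_i hx
      rw [ih (x + 1) (count + 1) (by omega)]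
      split
      · apply Prod.ext <;> simp
      · apply Prod.ext
        · simp; omega
        · simp; omega
    · rfl

theorem negLoopA2_eq (fuel : Nat) : ∀ (x count : Int), count.natAbs ≤ fuel →
    negLoopA2 fuel x count = x + max count 0 := by
  induction fuel with
  | zero => intro x count h; simp only [negLoopA2]; omega
  | succ n ih =>
    intro x count h
    simp only [negLoopA2]
    split
    · rw [ih (x + 1) (count + -1) (by omega)]; omega
    · omega

theorem negLoopA3_eq (fuel : Nat) : ∀ (x count : Int), x.natAbs ≤ fuel →
    negLoopA3 fuel x count = if 0 < x then (0, count + x) else (x, count) := by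
  induction fuel with
  | zero =>
    intro x count h
    simp only [negLoopA3]
    split <;> [omega; rfl]
  | succ n ih =>
    intro x count h
    simp only [negLoopA3]
    split
    · rename_i hx
      rw [ih (x + -1) (count + 1) (by omega)]
      split
      · apply Prod.ext
        · simp
        · simp; omega
      · apply Prod.ext
        · simp; omega
        · simp; omega
    · rfl

theorem negLoopA4_eq (fuel : Nat) : ∀ (x count : Int), count.natAbs ≤ fuel →
    negLoopA4 fuel x count = x - max count 0 := by
  induction fuel with
  | zero => intro x count h; simp only [negLoopA4]; omega
  | succ n ih =>
    intro x count h
    simp only [negLoopA4]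
    split
    · rw [ih (x + -1) (count + -1) (by omega)]; omega
    · omega

theorem negLoopB_eq (fuel : Nat) : ∀ (a neg delta : Int), a.natAbs ≤ fuel →
    (a = 0 ∨ (a < 0 ∧ 0 < delta) ∨ (0 < a ∧ delta < 0)) →
    negLoopB fuel a neg delta = neg - a := by
  induction fuel with
  | zero => intro a neg delta h _; simp only [negLoopB]; omega
  | succ n ih =>
    intro a neg delta h hinv
    simp only [negLoopB]
    split
    · omega
    · rename_i ha
      rw [ih]
      · split <;> omega
      · split <;> omega
      · split <;> omega

theorem negate_slow_eq_neg (x : Int) : negate_slow x = -x := by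
  unfold negate_slow
  split
  · omega
  · split
    · rename_i h0 h1
      rw [negLoopA1_eq x.natAbs x 0 le_rfl, if_pos h1]
      rw [negLoopA2_eq]
      · omega
      · simp
    · rename_i h0 h1
      have hx : 0 < x := by omega
      rw [negLoopA3_eq x.natAbs x 0 le_rfl, if_pos hx]
      rw [negLoopA4_eq]
      · omega
      · simp

theorem negate_slow_alt_eq_neg (x : Int) : negate_slow_alt x = -x := by
  unfold negate_slow_alt
  split
  · omega
  · rename_i hx
    rw [negLoopB_eq x.natAbs x 0 _ le_rfl]
    · omega
    · split <;> omega

-- ===== VERDICT (by name: the statement is the Claim_ definition above) =====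
theorem negate_slow_spec : Claim_equal_negate_slow := by
  intro x _
  unfold Spec_negate_slow
  rw [negate_slow_eq_neg, negate_slow_alt_eq_neg]
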